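-- pv_equiv track=rewrite | github.com/vaibhav201297/ArtificalIntelligence | Assignment 2/part2/quintris.py | get_transitions
-- ===== SOURCE A (Python) =====
-- def get_transitions(board):
--
--     row_result = 0
--     col_result = 0
--
--     for column in zip(*board):
--         for i in range(0, len(column) - 1):
--             if column[i] != column[i+1]:
--                 col_result += 1
--
--     for row in board:
--         for i in range(0, len(row) - 1):
--             if row[i] != row[i+1]:
--                 row_result += 1
--     return (row_result,col_result)
-- ===== SOURCE B (Python) =====
-- def get_transitions(board):
--     m = min(map(len, board), default=0)
--     row_result = 0
--     col_result = 0
--     prev = None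
--     for row in board:
--         row_result += sum(1 for a, b in zip(row, row[1:]) if a != b)
--         if prev is not None:
--             col_result += sum(1 for j in range(m) if prev[j] != row[j])
--         prev = row
--     return (row_result, col_result)
-- ===== Notes on version B (the rewrite author's own statement) =====
-- stated objective: alternative
-- what changed: B removes the zip(*board) transpose pass: one fused loop over the rows counts each row's horizontal transitions and compares the row with the previous row (up to the global minimum row length) for the vertical count.
import Mathlib
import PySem

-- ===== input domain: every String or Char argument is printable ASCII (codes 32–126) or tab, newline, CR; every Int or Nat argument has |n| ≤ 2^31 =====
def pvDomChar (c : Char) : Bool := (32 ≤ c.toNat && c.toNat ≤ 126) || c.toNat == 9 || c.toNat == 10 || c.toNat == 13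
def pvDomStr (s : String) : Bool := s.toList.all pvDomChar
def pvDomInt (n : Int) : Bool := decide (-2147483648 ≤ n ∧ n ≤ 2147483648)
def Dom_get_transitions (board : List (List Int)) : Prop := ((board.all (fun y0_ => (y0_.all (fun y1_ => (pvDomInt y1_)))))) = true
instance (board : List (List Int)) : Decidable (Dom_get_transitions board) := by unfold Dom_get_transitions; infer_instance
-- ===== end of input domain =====

-- B replaces A's zip(*board) transpose by one fused pass over consecutive row pairs
-- (vertical cells compared row-major up to the global minimum row length); alternative decomposition, same result.

-- ===== PORT A =====
-- zip(*board): list of columns, truncated to the shortest row (empty for an empty board)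
def pyZipStar (board : List (List Int)) : List (List Int) :=
  let m := ((board.map List.length).min?).getD 0
  (List.range m).map (fun j => board.map (fun r => r.getD j 0))

def get_transitions (board : List (List Int)) : Int × Int :=
  let col_result : Int :=
    (pyZipStar board).foldl (fun acc column =>
      (PySem.List.pyRange 0 ((column.length : Int) - 1) 1).foldl
        (fun a i =>
          if PySem.List.pyGetD column i 0 ≠ PySem.List.pyGetD column (i + 1) 0 then a + 1 else a)
        acc) 0
  let row_result : Int :=
    board.foldl (fun acc row =>
      (PySem.List.pyRange 0 ((row.length : Int) - 1) 1).foldl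
        (fun a i =>
          if PySem.List.pyGetD row i 0 ≠ PySem.List.pyGetD row (i + 1) 0 then a + 1 else a)
        acc) 0
  (row_result, col_result)

-- ===== PORT B =====
def get_transitions_alt (board : List (List Int)) : Int × Int :=
  let m := ((board.map List.length).min?).getD 0
  let st : Option (List Int) × Int × Int :=
    board.foldl (fun st row =>
      let rr : Int := st.2.1 + (((row.zip (row.drop 1)).countP (fun p => p.1 != p.2) : Nat) : Int)
      let cr : Int :=
        match st.1 with
        | none => st.2.2
        | some prev =>
            st.2.2 + ((((List.range m).filter (fun j => prev.getD j 0 != row.getD j 0)).length : Nat) : Int)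
      (some row, rr, cr)) (none, 0, 0)
  (st.2.1, st.2.2)

-- ===== PRECONDITION & SPEC =====
def Spec_get_transitions (board : List (List Int)) (out : Int × Int) : Prop := out = get_transitions_alt board
instance (board : List (List Int)) (out : Int × Int) : Decidable (Spec_get_transitions board out) := by unfold Spec_get_transitions; infer_instance

-- ===== CLAIM (what is proved, stated in full; the proofs are below) =====
def Claim_equal_get_transitions : Prop := ∀ (board : List (List Int)), Dom_get_transitions board → Spec_get_transitions board (get_transitions board)

-- ===== LEMMAS AND PROOFS =====

-- helper notions used only by the proofs
def pvRowCnt (r : List Int) : Int := (((r.zip (r.drop 1)).countP (fun p => p.1 != p.2) : Nat) : Int)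

def pvColPairs (m : Nat) (p r : List Int) : Int :=
  ((((List.range m).filter (fun j => p.getD j 0 != r.getD j 0)).length : Nat) : Int)

def pvVert (m : Nat) : List Int → List (List Int) → Int
  | _, [] => 0
  | p, r :: rs => pvColPairs m p r + pvVert m r rs

theorem pvRangeSum (f : ℕ → ℤ) (n : ℕ) :
    ((List.range n).map f).sum = ∑ i ∈ Finset.range n, f i := by
  induction n with
  | zero => simp
  | succ k ih => rw [List.range_succ, Finset.sum_range_succ]; simp [ih]


theorem pvZipIdx (c : List Int) :
    ((c.zip (c.drop 1)).countP (fun p => p.1 != p.2))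
      = (List.range (c.length - 1)).countP (fun t => decide (c.getD t 0 ≠ c.getD (t + 1) 0)) := by
  induction c with
  | nil => simp
  | cons a t ih =>
    cases t with
    | nil => simp
    | cons b u =>
      have h : (a :: b :: u).length - 1 = ((b :: u).length - 1) + 1 := by simp
      rw [h, List.range_succ_eq_map, List.countP_cons, List.countP_map]
      have hpred : ((fun t => decide ((a :: b :: u).getD t 0 ≠ (a :: b :: u).getD (t + 1) 0)) ∘ Nat.succ)
          = (fun t => decide ((b :: u).getD t 0 ≠ (b :: u).getD (t + 1) 0)) := by
        funext t
        simp
      rw [hpred, ← ih]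
      simp only [List.drop_succ_cons, List.drop_zero]
      rw [show (a :: b :: u).zip (b :: u) = (a, b) :: (b :: u).zip u from rfl, List.countP_cons]
      simp [List.getD]

def pvCnt (c : List Int) : Int :=
  ((List.range (c.length - 1)).countP (fun t => decide (c.getD t 0 ≠ c.getD (t + 1) 0)) : Int)

theorem pvInner (c : List Int) (acc : Int) :
    (PySem.List.pyRange 0 ((c.length : Int) - 1) 1).foldl
      (fun a i =>
        if PySem.List.pyGetD c i 0 ≠ PySem.List.pyGetD c (i + 1) 0 then a + 1 else a) acc
    = acc + pvCnt c := by
  rw [PySem.List.pyRange_one]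
  rw [show (((c.length : Int) - 1) - 0).toNat = c.length - 1 from by omega]
  rw [List.foldl_map]
  have hcast : ∀ (k : ℕ), ((0 : Int) + (k : Int)) = ((k : Int)) := by intro k; ring
  simp only [hcast, PySem.List.pyGetD_natCast]
  have : ∀ (k : ℕ), ((k : Int) + 1) = (((k + 1 : ℕ) : Int)) := by intro k; push_cast; ring
  simp only [this, PySem.List.pyGetD_natCast]
  rw [PySem.List.foldl_ite_add_one]
  rfl

theorem pvCountSum (p : ℕ → Bool) (k : ℕ) :
    (((List.range k).countP p : ℕ) : ℤ) = ∑ i ∈ Finset.range k, (if p i then (1 : ℤ) else 0) := by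
  induction k with
  | zero => simp
  | succ j ih =>
    rw [List.range_succ, List.countP_append, Finset.sum_range_succ, ← ih]
    simp [List.countP_cons]

theorem pvColPairs_sum (m : Nat) (a b : List Int) :
    pvColPairs m a b
      = ∑ j ∈ Finset.range m, (if a.getD j 0 ≠ b.getD j 0 then (1 : ℤ) else 0) := by
  unfold pvColPairs
  rw [← List.countP_eq_length_filter, pvCountSum]
  apply Finset.sum_congr rfl
  intro j _
  split_ifs <;> simp_all

theorem pvCnt_sum (c : List Int) :
    pvCnt c = ∑ i ∈ Finset.range (c.length - 1),
        (if c.getD i 0 ≠ c.getD (i + 1) 0 then (1 : ℤ) else 0) := by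
  unfold pvCnt
  rw [pvCountSum]
  apply Finset.sum_congr rfl
  intro i _
  split_ifs <;> simp_all

theorem pvGetDmap (board : List (List Int)) (j i : ℕ) (h : i < board.length) :
    (board.map (fun r => r.getD j 0)).getD i 0 = (board.getD i []).getD j 0 := by
  rw [List.getD_eq_getElem _ _ (by simpa using h), List.getElem_map,
      List.getD_eq_getElem _ _ h]


theorem pvRowCnt_eq_pvCnt (c : List Int) : pvRowCnt c = pvCnt c := by
  unfold pvRowCnt pvCnt
  rw [pvZipIdx]

-- characterisation of B's fused fold
theorem pvBfold (m : Nat) (rows : List (List Int)) : ∀ (prev : List Int) (rr cr : Int),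
    ∃ q, rows.foldl (fun st row =>
        let rr : Int := st.2.1 + (((row.zip (row.drop 1)).countP (fun p => p.1 != p.2) : Nat) : Int)
        let cr : Int :=
          match st.1 with
          | none => st.2.2
          | some prev =>
              st.2.2 + ((((List.range m).filter (fun j => prev.getD j 0 != row.getD j 0)).length : Nat) : Int)
        ((some row : Option (List Int)), rr, cr)) (some prev, rr, cr)
      = (some q, rr + (rows.map pvRowCnt).sum, cr + pvVert m prev rows) := by
  induction rows with
  | nil => intro prev rr cr; exact ⟨prev, by simp [pvVert]⟩
  | cons r rs ih =>
      intro prev rr cr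
      obtain ⟨q, hq⟩ := ih r (rr + pvRowCnt r) (cr + pvColPairs m prev r)
      refine ⟨q, ?_⟩
      simp only [List.foldl_cons]
      exact hq.trans (by
        simp only [List.map_cons, List.sum_cons, pvVert, Prod.mk.injEq]
        exact ⟨trivial, by ring, by ring⟩)

-- pvVert as an indexed sum over consecutive pairs
theorem pvVert_idx (m : Nat) (rows : List (List Int)) : ∀ (p : List Int),
    pvVert m p rows
      = ∑ i ∈ Finset.range rows.length,
          pvColPairs m ((p :: rows).getD i []) ((p :: rows).getD (i + 1) []) := by
  induction rows with
  | nil => intro p; simp [pvVert]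
  | cons r rs ih =>
      intro p
      simp only [pvVert]
      rw [ih r]
      rw [show (r :: rs).length = rs.length + 1 from rfl, Finset.sum_range_succ']
      simp
      ring

-- A's per-sequence loop, folded over a list of sequences
theorem pvAfoldRows (rows : List (List Int)) (acc : Int) :
    rows.foldl (fun acc row =>
      (PySem.List.pyRange 0 ((row.length : Int) - 1) 1).foldl
        (fun a i =>
          if PySem.List.pyGetD row i 0 ≠ PySem.List.pyGetD row (i + 1) 0 then a + 1 else a)
        acc) acc
    = acc + (rows.map pvCnt).sum := by
  rw [PySem.List.foldl_congr_mem rows _ (fun acc row => acc + pvCnt row) acc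
        (fun a x _ => pvInner x a)]
  rw [PySem.List.foldl_add rows pvCnt acc]

-- A's result, in closed form
theorem pvAEq (board : List (List Int)) :
    get_transitions board
      = ((board.map pvCnt).sum,
         ((List.range (((board.map List.length).min?).getD 0)).map
            (fun j => pvCnt (board.map (fun r => r.getD j 0)))).sum) := by
  unfold get_transitions pyZipStar
  rw [pvAfoldRows, pvAfoldRows]
  simp [List.map_map, Function.comp_def]

-- B's result, in closed form
theorem pvAltEq (board : List (List Int)) :
    get_transitions_alt board
      = ((board.map pvRowCnt).sum,
         match board with
         | [] => 0
         | r :: rs => pvVert (((board.map List.length).min?).getD 0) r rs) := by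
  cases board with
  | nil => rfl
  | cons r rs =>
    obtain ⟨q, hq⟩ := pvBfold (((((r :: rs).map List.length).min?).getD 0)) rs r
      (0 + (((r.zip (r.drop 1)).countP (fun p => p.1 != p.2) : Nat) : Int)) 0
    unfold get_transitions_alt
    simp only [List.foldl_cons]
    rw [hq]
    simp [pvRowCnt]

-- the column count of A equals the fused vertical count of B
theorem pvColBridge (m : ℕ) (r : List Int) (rs : List (List Int)) :
    ((List.range m).map (fun j => pvCnt ((r :: rs).map (fun row => row.getD j 0)))).sum
      = pvVert m r rs := by
  calc ((List.range m).map (fun j => pvCnt ((r :: rs).map (fun row => row.getD j 0)))).sum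
      = ∑ j ∈ Finset.range m, ∑ i ∈ Finset.range rs.length,
          (if ((r :: rs).getD i []).getD j 0 ≠ ((r :: rs).getD (i + 1) []).getD j 0
            then (1 : ℤ) else 0) := by
        rw [pvRangeSum]
        apply Finset.sum_congr rfl
        intro j _
        rw [pvCnt_sum]
        rw [show ((r :: rs).map (fun row => row.getD j 0)).length - 1 = rs.length from by simp]
        apply Finset.sum_congr rfl
        intro i hi
        have hi' : i < (r :: rs).length := by simp at hi ⊢; omega
        have hi2 : i + 1 < (r :: rs).length := by simp at hi ⊢; omega
        rw [pvGetDmap _ _ _ hi', pvGetDmap _ _ _ hi2]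
    _ = ∑ i ∈ Finset.range rs.length, ∑ j ∈ Finset.range m,
          (if ((r :: rs).getD i []).getD j 0 ≠ ((r :: rs).getD (i + 1) []).getD j 0
            then (1 : ℤ) else 0) := Finset.sum_comm
    _ = pvVert m r rs := by
        rw [pvVert_idx]
        apply Finset.sum_congr rfl
        intro i _
        rw [pvColPairs_sum]

-- ===== VERDICT (by name: the statement is the Claim_ definition above) =====
theorem get_transitions_spec : Claim_equal_get_transitions := by
  intro board _
  unfold Spec_get_transitions
  rw [pvAEq, pvAltEq]
  cases board with
  | nil => simp
  | cons r rs =>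
    simp only [Prod.mk.injEq]
    constructor
    · exact congrArg List.sum
        (List.map_congr_left (fun c _ => (pvRowCnt_eq_pvCnt c).symm))
    · exact pvColBridge _ r rs
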